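-- pv_equiv track=rewrite | github.com/karia/ai_chatbot | bedrock_utils.py | format_conversation_for_claude
-- ===== SOURCE A (Python) =====
-- def format_conversation_for_claude(conversation_history, append_message=None):
--     formatted_messages = []
--     assistant_response_count = 0
--     last_role = None
--
--     for msg in conversation_history:
--         role = "assistant" if msg.get("bot_id") else "user"
--         content = msg["text"]
--
--         # ボットメンションを除去（Slackの履歴にはメンションが含まれている可能性があるため）
--         if role == "user":
--             content = content.split(">", 1)[-1].strip()
--
--         if role == "assistant":
--             assistant_response_count += 1
--
--         # 同じロールが連続する場合、内容を結合する
--         if role == last_role and formatted_messages: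
--             formatted_messages[-1]["content"] += f"\n{content}"
--         else:
--             formatted_messages.append({"role": role, "content": content})
--             last_role = role
--
--     # append_message が指定されている場合、最後のメッセージとして追加
--     if append_message:
--         if formatted_messages and formatted_messages[-1]["role"] == "user":
--             formatted_messages[-1]["content"] += f"\n{append_message}"
--         else:
--             formatted_messages.append({"role": "user", "content": append_message})
--
--     return formatted_messages, assistant_response_count
-- ===== SOURCE B (Python) =====
-- def format_conversation_for_claude(conversation_history, append_message=None):
--     # Pass 1: one scan computing (role, content) pairs and the assistant count.
--     assistant_response_count = 0
--     pairs = []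
--     for msg in conversation_history:
--         if msg.get("bot_id"):
--             assistant_response_count += 1
--             pairs.append(("assistant", msg["text"]))
--         else:
--             pairs.append(("user", msg["text"].split(">", 1)[-1].strip()))
--     # Pass 2: merge consecutive same-role runs, joining contents with '\n'.
--     formatted_messages = []
--     i, n = 0, len(pairs)
--     while i < n:
--         role = pairs[i][0]
--         j = i + 1
--         while j < n and pairs[j][0] == role:
--             j += 1
--         formatted_messages.append({"role": role, "content": "\n".join(c for _, c in pairs[i:j])})
--         i = j
--     # Tail: attach append_message to the last user message or as a new one.
--     if append_message:
--         if formatted_messages and formatted_messages[-1]["role"] == "user":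
--             formatted_messages[-1]["content"] += f"\n{append_message}"
--         else:
--             formatted_messages.append({"role": "user", "content": append_message})
--     return formatted_messages, assistant_response_count
-- ===== Notes on version B (the rewrite author's own statement) =====
-- stated objective: alternative
-- what changed: A's single stateful loop (last_role tracking with in-place merging of the growing output) is replaced by a two-phase pipeline: one pass builds (role, content) pairs and counts assistant messages, then consecutive same-role runs are grouped and their contents joined with '\n'; the same tail logic handles append_message. Pre_ excludes only inputs where some message lacks the 'text' key, on which both A and B raise KeyError.
import Mathlib
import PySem

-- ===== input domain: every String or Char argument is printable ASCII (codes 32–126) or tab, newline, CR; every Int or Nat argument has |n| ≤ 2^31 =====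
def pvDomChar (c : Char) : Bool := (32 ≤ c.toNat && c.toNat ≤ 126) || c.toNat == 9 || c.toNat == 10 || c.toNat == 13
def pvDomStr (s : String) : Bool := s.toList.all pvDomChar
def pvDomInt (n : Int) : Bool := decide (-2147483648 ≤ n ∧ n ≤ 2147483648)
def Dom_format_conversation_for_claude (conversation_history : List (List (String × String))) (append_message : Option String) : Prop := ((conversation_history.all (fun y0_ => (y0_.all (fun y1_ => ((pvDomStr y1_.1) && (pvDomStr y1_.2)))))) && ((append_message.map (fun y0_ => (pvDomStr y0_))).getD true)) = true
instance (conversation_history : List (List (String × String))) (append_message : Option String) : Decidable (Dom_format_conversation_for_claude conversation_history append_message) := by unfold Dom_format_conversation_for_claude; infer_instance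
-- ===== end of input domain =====

-- B restructures A's single stateful merge loop into a two-phase pipeline (pairs pass + run grouping); same results.

-- shared helpers (both Pythons contain these identical sub-expressions)
-- first-match association-list lookup (= dict access on the message dicts)
def pvLookup : List (String × String) → String → Option String
  | [], _ => none
  | (k, v) :: rest, key => if k == key then some v else pvLookup rest key

-- Python truthiness of msg.get("bot_id") (None or "" are falsy)
def pvTruthy : Option String → Bool
  | none => false
  | some s => s != ""

-- content.split(">", 1)[-1].strip()
def pvStripMention (c : String) : String :=
  PySem.Str.strip ((PySem.List.pyGet? ((PySem.Str.splitMax? c ">" 1).getD []) (-1)).getD "")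

-- d[key] += s on the first matching key (key always present where used)
def pvAppendVal : List (String × String) → String → String → List (String × String)
  | [], _, _ => []
  | (k, v) :: rest, key, s => if k == key then (k, v ++ s) :: rest else (k, v) :: pvAppendVal rest key s

def mkMsg (r c : String) : List (String × String) := [("role", r), ("content", c)]

-- the identical tail block of A and B: attach append_message (if truthy)
def pvTail (fmt : List (List (String × String))) (am : Option String) : List (List (String × String)) :=
  match am with
  | none => fmt
  | some s =>
    if s == "" then fmt
    else if !fmt.isEmpty && ((pvLookup (fmt.getLastD []) "role").getD "" == "user") then
      fmt.dropLast ++ [pvAppendVal (fmt.getLastD []) "content" ("\n" ++ s)]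
    else fmt ++ [mkMsg "user" s]

-- ===== PORT A =====
-- A's loop body: compute role/content, count assistants, merge into the growing list via last_role
def pvStepA (st : List (List (String × String)) × Int × Option String) (msg : List (String × String)) : List (List (String × String)) × Int × Option String :=
  let fmt := st.1
  let cnt := st.2.1
  let lastR := st.2.2
  let role := if pvTruthy (pvLookup msg "bot_id") then "assistant" else "user"
  let content := (pvLookup msg "text").getD ""
  let content := if role == "user" then pvStripMention content else content
  let cnt := if role == "assistant" then cnt + 1 else cnt
  if lastR == some role && !fmt.isEmpty then
    (fmt.dropLast ++ [pvAppendVal (fmt.getLastD []) "content" ("\n" ++ content)], cnt, lastR)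
  else
    (fmt ++ [mkMsg role content], cnt, some role)

def format_conversation_for_claude (conversation_history : List (List (String × String))) (append_message : Option String) : (List (List (String × String))) × Int :=
  let st := conversation_history.foldl pvStepA ([], 0, none)
  (pvTail st.1 append_message, st.2.1)

-- ===== PORT B =====
-- pass 1 body: append the (role, content) pair, counting assistants
def pvStepB (st : List (String × String) × Int) (msg : List (String × String)) : List (String × String) × Int :=
  if pvTruthy (pvLookup msg "bot_id") then
    (st.1 ++ [("assistant", (pvLookup msg "text").getD "")], st.2 + 1)
  else
    (st.1 ++ [("user", pvStripMention ((pvLookup msg "text").getD ""))], st.2)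

-- pass 2: group consecutive same-role runs, joining contents with "\n"
def pvGroupRuns : List (String × String) → List (List (String × String))
  | [] => []
  | (r, c) :: rest =>
    mkMsg r (PySem.Str.join "\n" (c :: (rest.takeWhile (fun p => p.1 == r)).map Prod.snd))
      :: pvGroupRuns (rest.dropWhile (fun p => p.1 == r))
termination_by l => l.length
decreasing_by
  have h := List.length_dropWhile_le (fun p => p.1 == r) rest
  simp only [List.length_cons]
  omega

def format_conversation_for_claude_alt (conversation_history : List (List (String × String))) (append_message : Option String) : (List (List (String × String))) × Int :=
  let pc := conversation_history.foldl pvStepB ([], 0)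
  (pvTail (pvGroupRuns pc.1) append_message, pc.2)

-- ===== PRECONDITION & SPEC =====
-- Pre_ excludes exactly the inputs where some message lacks the "text" key: there A (and B) raise KeyError.
def Pre_format_conversation_for_claude (conversation_history : List (List (String × String))) (append_message : Option String) : Prop :=
  conversation_history.all (fun msg => (pvLookup msg "text").isSome) = true
instance (conversation_history : List (List (String × String))) (append_message : Option String) : Decidable (Pre_format_conversation_for_claude conversation_history append_message) := by unfold Pre_format_conversation_for_claude; infer_instance

def pvWitness_format_conversation_for_claude : (List (List (String × String))) × Option String :=
  ([[("text", "<@U1> hello")], [("bot_id", "B1"), ("text", "hi there")], [("text", "more")]], some "ok")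

def Spec_format_conversation_for_claude (conversation_history : List (List (String × String))) (append_message : Option String) (out : (List (List (String × String))) × Int) : Prop := out = format_conversation_for_claude_alt conversation_history append_message
instance (conversation_history : List (List (String × String))) (append_message : Option String) (out : (List (List (String × String))) × Int) : Decidable (Spec_format_conversation_for_claude conversation_history append_message out) := by unfold Spec_format_conversation_for_claude; infer_instance

-- ===== CLAIM (what is proved, stated in full; the proofs are below) =====
def Claim_equal_format_conversation_for_claude : Prop := ∀ (conversation_history : List (List (String × String))) (append_message : Option String), Dom_format_conversation_for_claude conversation_history append_message → Pre_format_conversation_for_claude conversation_history append_message → Spec_format_conversation_for_claude conversation_history append_message (format_conversation_for_claude conversation_history append_message)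

-- ===== LEMMAS AND PROOFS =====

-- the (role, content) pair a message contributes
def pvToPair (msg : List (String × String)) : String × String :=
  if pvTruthy (pvLookup msg "bot_id") then ("assistant", (pvLookup msg "text").getD "")
  else ("user", pvStripMention ((pvLookup msg "text").getD ""))

-- A's merge action on a pair, count dropped
def pvMerge (st : List (List (String × String)) × Option String) (p : String × String) : List (List (String × String)) × Option String :=
  if st.2 == some p.1 && !st.1.isEmpty then
    (st.1.dropLast ++ [pvAppendVal (st.1.getLastD []) "content" ("\n" ++ p.2)], st.2)
  else (st.1 ++ [mkMsg p.1 p.2], some p.1)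

def pvBots (ch : List (List (String × String))) : Int :=
  (ch.countP (fun m => pvTruthy (pvLookup m "bot_id")) : Int)

lemma stepA_eq (st : List (List (String × String)) × Int × Option String) (msg : List (String × String)) :
    pvStepA st msg = ((pvMerge (st.1, st.2.2) (pvToPair msg)).1,
      (if pvTruthy (pvLookup msg "bot_id") then st.2.1 + 1 else st.2.1),
      (pvMerge (st.1, st.2.2) (pvToPair msg)).2) := by
  by_cases hb : pvTruthy (pvLookup msg "bot_id") <;>
    simp [pvStepA, pvMerge, pvToPair, hb] <;> split <;> simp

lemma foldA_eq (ch : List (List (String × String))) :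
    ∀ (fmt : List (List (String × String))) (cnt : Int) (lastR : Option String),
      ch.foldl pvStepA (fmt, cnt, lastR) =
        (((ch.map pvToPair).foldl pvMerge (fmt, lastR)).1,
         cnt + pvBots ch,
         ((ch.map pvToPair).foldl pvMerge (fmt, lastR)).2) := by
  induction ch with
  | nil => intro fmt cnt lastR; simp [pvBots]
  | cons m rest ih =>
    intro fmt cnt lastR
    rw [List.foldl_cons, stepA_eq]
    rw [ih]
    by_cases hb : pvTruthy (pvLookup m "bot_id") <;>
      simp [pvBots, hb] <;> ring_nf

lemma foldB_eq (ch : List (List (String × String))) :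
    ∀ (acc : List (String × String)) (cnt : Int),
      ch.foldl pvStepB (acc, cnt) = (acc ++ ch.map pvToPair, cnt + pvBots ch) := by
  induction ch with
  | nil => intro acc cnt; simp [pvBots]
  | cons m rest ih =>
    intro acc cnt
    rw [List.foldl_cons]
    by_cases hb : pvTruthy (pvLookup m "bot_id") <;>
      simp [pvStepB, hb, ih, pvToPair, pvBots] <;> ring

lemma join_singleton (c : String) : PySem.Str.join "\n" [c] = c := by
  simp [PySem.Str.join, PySem.Chars.join_singleton]

lemma chars_join_merge (a b : List Char) (l : List (List Char)) :
    PySem.Chars.join ['\n'] ((a ++ ['\n'] ++ b) :: l) = PySem.Chars.join ['\n'] (a :: b :: l) := by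
  cases l with
  | nil => simp [PySem.Chars.join_singleton, PySem.Chars.join_cons_cons]
  | cons d l' => simp [PySem.Chars.join_cons_cons]

lemma join_merge (a b : String) (l : List String) :
    PySem.Str.join "\n" ((a ++ "\n" ++ b) :: l) = PySem.Str.join "\n" (a :: b :: l) := by
  have h := chars_join_merge a.toList b.toList (l.map String.toList)
  simp [PySem.Str.join, String.toList_append] at h ⊢
  rw [h]

lemma groupRuns_merge (r c c' : String) (rest : List (String × String)) :
    pvGroupRuns ((r, c ++ ("\n" ++ c')) :: rest) = pvGroupRuns ((r, c) :: (r, c') :: rest) := by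
  rw [pvGroupRuns, pvGroupRuns]
  simp [mkMsg, ← String.append_assoc, join_merge]

lemma appendVal_mkMsg (r c s : String) :
    pvAppendVal (mkMsg r c) "content" s = mkMsg r (c ++ s) := by
  simp [pvAppendVal, mkMsg]

lemma groupRuns_new (rest : List (String × String)) (r c r' c' : String) (h : ¬ r' = r) :
    pvGroupRuns ((r, c) :: (r', c') :: rest) = mkMsg r c :: pvGroupRuns ((r', c') :: rest) := by
  conv_lhs => rw [pvGroupRuns]
  simp [h, join_singleton]

lemma mergeFold_eq (pairs : List (String × String)) :
    ∀ (fmt : List (List (String × String))) (r c : String),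
      (pairs.foldl pvMerge (fmt ++ [mkMsg r c], some r)).1 = fmt ++ pvGroupRuns ((r, c) :: pairs) := by
  induction pairs with
  | nil =>
    intro fmt r c
    simp [pvGroupRuns, join_singleton]
  | cons p rest ih =>
    intro fmt r c
    obtain ⟨r', c'⟩ := p
    rw [List.foldl_cons]
    by_cases h : r' = r
    · subst h
      have hm : pvMerge (fmt ++ [mkMsg r' c], some r') (r', c')
          = (fmt ++ [mkMsg r' (c ++ ("\n" ++ c'))], some r') := by
        simp [pvMerge, appendVal_mkMsg]
      rw [hm, ih, groupRuns_merge]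
    · have hm : pvMerge (fmt ++ [mkMsg r c], some r) (r', c')
          = ((fmt ++ [mkMsg r c]) ++ [mkMsg r' c'], some r') := by
        simp [pvMerge, Ne.symm h]
      rw [hm, ih, groupRuns_new rest r c r' c' h, List.append_assoc]
      simp

lemma mergeFold_top (pairs : List (String × String)) :
    (pairs.foldl pvMerge ([], none)).1 = pvGroupRuns pairs := by
  cases pairs with
  | nil => simp [pvGroupRuns]
  | cons p rest =>
    obtain ⟨r, c⟩ := p
    rw [List.foldl_cons]
    have hm : pvMerge ([], none) (r, c) = ([] ++ [mkMsg r c], some r) := by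
      simp [pvMerge]
    rw [hm, mergeFold_eq]
    simp

-- ===== VERDICT (by name: the statement is the Claim_ definition above) =====
theorem format_conversation_for_claude_spec : Claim_equal_format_conversation_for_claude := by
  intro ch am _ _
  unfold Spec_format_conversation_for_claude
  unfold format_conversation_for_claude format_conversation_for_claude_alt
  rw [foldA_eq, foldB_eq, mergeFold_top]
  simp
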